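-- pv_equiv track=rewrite | github.com/warHanz/analisis-sentimen | utils/utils.py | label_sentiment
-- ===== SOURCE A (Python) =====
-- def label_sentiment(tokens, positive_words, negative_words):
--     """
--     Label sentiment based on tokenized words, counting matches in positive/negative lexicons.
--     Returns a sentiment score and label (Positive, Negative, Neutral).
--     """
--     positive_count = sum(1 for token in tokens if token in positive_words)
--     negative_count = sum(1 for token in tokens if token in negative_words)
--     sentiment_score = positive_count - negative_count
--
--     if sentiment_score > 0:
--         sentiment = "Positive"
--     elif sentiment_score < 0:
--         sentiment = "Negative"
--     else:
--         sentiment = "Neutral"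
--
--     return sentiment_score, sentiment
-- ===== SOURCE B (Python) =====
-- def label_sentiment(tokens, positive_words, negative_words):
--     # Aggregate by distinct word: build a frequency table once, then score each
--     # distinct word times its multiplicity; label by arithmetic sign lookup.
--     counts = {}
--     for token in tokens:
--         counts[token] = counts.get(token, 0) + 1
--     sentiment_score = 0
--     for word, c in counts.items():
--         if word in positive_words:
--             sentiment_score += c
--         if word in negative_words:
--             sentiment_score -= c
--     labels = {1: "Positive", -1: "Negative", 0: "Neutral"}
--     return sentiment_score, labels[(sentiment_score > 0) - (sentiment_score < 0)]
-- ===== Notes on version B (the rewrite author's own statement) =====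
-- stated objective: alternative
-- what changed: B builds a frequency dictionary of the tokens once, scores each DISTINCT word once weighted by its multiplicity (so duplicate tokens are not re-scanned), and picks the label by an arithmetic sign lookup in a table instead of A's per-occurrence double scan and branch chain.
import Mathlib
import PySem

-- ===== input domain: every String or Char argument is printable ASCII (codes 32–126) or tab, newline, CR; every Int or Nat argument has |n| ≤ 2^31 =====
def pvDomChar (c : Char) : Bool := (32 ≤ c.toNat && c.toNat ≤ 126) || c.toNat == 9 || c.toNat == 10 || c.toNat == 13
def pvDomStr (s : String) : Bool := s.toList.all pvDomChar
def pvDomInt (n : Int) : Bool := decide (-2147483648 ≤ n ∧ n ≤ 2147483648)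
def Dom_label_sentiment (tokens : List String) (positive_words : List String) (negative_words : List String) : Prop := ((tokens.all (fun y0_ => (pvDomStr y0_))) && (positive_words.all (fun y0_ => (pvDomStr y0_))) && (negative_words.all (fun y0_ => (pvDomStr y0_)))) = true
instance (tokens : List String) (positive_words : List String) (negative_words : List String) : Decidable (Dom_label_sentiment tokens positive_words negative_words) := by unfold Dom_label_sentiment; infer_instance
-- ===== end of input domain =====

-- ===== PORT A =====
-- B replaces A's two per-occurrence scans by a frequency dictionary over distinct tokens and a sign-table label lookup (objective: alternative).
def label_sentiment (tokens : List String) (positive_words : List String) (negative_words : List String) : Int × String :=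
  -- sum(1 for token in tokens if token in positive_words)
  let positive_count : Int := tokens.foldl (fun acc token => if positive_words.contains token then acc + 1 else acc) 0
  -- sum(1 for token in tokens if token in negative_words)
  let negative_count : Int := tokens.foldl (fun acc token => if negative_words.contains token then acc + 1 else acc) 0
  let sentiment_score := positive_count - negative_count
  let sentiment := if sentiment_score > 0 then "Positive" else if sentiment_score < 0 then "Negative" else "Neutral"
  (sentiment_score, sentiment)

-- ===== PORT B =====
def label_sentiment_alt (tokens : List String) (positive_words : List String) (negative_words : List String) : Int × String :=
  -- counts = {}; for token in tokens: counts[token] = counts.get(token, 0) + 1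
  let counts : PySem.Dict String Int := tokens.foldl (fun d t => d.insert t (d.getD t 0 + 1)) PySem.Dict.empty
  -- for word, c in counts.items(): two independent ifs
  let sentiment_score : Int := counts.items.foldl
    (fun s p =>
      let s := if positive_words.contains p.1 then s + p.2 else s
      if negative_words.contains p.1 then s - p.2 else s) 0
  -- labels = {1: "Positive", -1: "Negative", 0: "Neutral"}
  let labels : PySem.Dict Int String := PySem.Dict.ofList [(1, "Positive"), (-1, "Negative"), (0, "Neutral")]
  -- (score > 0) - (score < 0)
  let sign : Int := (if sentiment_score > 0 then 1 else 0) - (if sentiment_score < 0 then 1 else 0)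
  -- labels[sign]: Python raises KeyError on a missing key, but sign is always in {-1, 0, 1},
  -- so this lookup always succeeds and the .getD "" default is never taken (exact on all inputs).
  (sentiment_score, (labels.get? sign).getD "")

-- ===== PRECONDITION & SPEC =====
def Spec_label_sentiment (tokens : List String) (positive_words : List String) (negative_words : List String) (out : Int × String) : Prop := out = label_sentiment_alt tokens positive_words negative_words
instance (tokens : List String) (positive_words : List String) (negative_words : List String) (out : Int × String) : Decidable (Spec_label_sentiment tokens positive_words negative_words out) := by unfold Spec_label_sentiment; infer_instance

-- ===== CLAIM (what is proved, stated in full; the proofs are below) =====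
def Claim_equal_label_sentiment : Prop := ∀ (tokens : List String) (positive_words : List String) (negative_words : List String), Dom_label_sentiment tokens positive_words negative_words → Spec_label_sentiment tokens positive_words negative_words (label_sentiment tokens positive_words negative_words)

-- ===== LEMMAS AND PROOFS =====

-- subtraction distributes over a list sum
theorem pv_sum_map_sub {α : Type} (l : List α) (f h : α → Int) :
    (l.map (fun x => f x - h x)).sum = (l.map f).sum - (l.map h).sum := by
  induction l with
  | nil => simp
  | cons a l ih => simp [ih]; ring

-- on a Nodup list containing t, the sum of "g at t, else 0" is g t
theorem pv_sum_map_ite_self (S : List String) (hnd : S.Nodup) (t : String) (ht : t ∈ S) (g : String → Int) :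
    (S.map (fun k => if k = t then g k else 0)).sum = g t := by
  induction S with
  | nil => cases ht
  | cons a S ih =>
    by_cases hat : a = t
    · subst hat
      have hz : ((S.map (fun k => if k = a then g k else 0)).sum : Int) = 0 := by
        apply List.sum_eq_zero
        intro x hx
        rcases List.mem_map.mp hx with ⟨k, hk, rfl⟩
        have hne : k ≠ a := fun he => (List.nodup_cons.mp hnd).1 (he ▸ hk)
        simp [hne]
      simp [hz]
    · have hmem : t ∈ S := by
        rcases List.mem_cons.mp ht with h | h
        · exact absurd h.symm hat
        · exact h
      simp only [List.map_cons, List.sum_cons, if_neg hat]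
      rw [ih (List.nodup_cons.mp hnd).2 hmem]
      omega

-- scoring each distinct token once, weighted by its multiplicity, equals scoring per occurrence
theorem pv_sum_count_ofList (g : String → Int) (xs : List String) :
    ((PySem.Set.ofList xs).map (fun k => ((xs.count k : Nat) : Int) * g k)).sum = (xs.map g).sum := by
  induction xs using List.reverseRecOn with
  | nil => simp [PySem.Set.ofList_eq_foldl]
  | append_singleton xs t ih =>
    have hof : PySem.Set.ofList (xs ++ [t]) = PySem.Set.add (PySem.Set.ofList xs) t := by
      simp [PySem.Set.ofList_eq_foldl, List.foldl_append]
    by_cases ht : t ∈ xs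
    · rw [hof, PySem.Set.add_of_mem ((PySem.Set.mem_ofList _ _).mpr ht)]
      have hsplit : ((PySem.Set.ofList xs).map (fun k => (((xs ++ [t]).count k : Nat) : Int) * g k))
          = (PySem.Set.ofList xs).map (fun k => ((xs.count k : Nat) : Int) * g k + (if k = t then g k else 0)) := by
        apply List.map_congr_left
        intro k _
        by_cases hk : k = t
        · subst hk
          simp [List.count_append]
          ring
        · have hc : (xs ++ [t]).count k = xs.count k := by
            simp [List.count_append, List.count_cons]
            exact fun he => hk he.symm
          simp [hc, hk]
      rw [hsplit, PySem.List.sum_map_add_int, ih,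
          pv_sum_map_ite_self _ (PySem.Set.nodup_ofList xs) t ((PySem.Set.mem_ofList _ _).mpr ht) g]
      simp
    · rw [hof, PySem.Set.add_of_not_mem (fun hm => ht ((PySem.Set.mem_ofList _ _).mp hm))]
      rw [List.map_append, List.sum_append]
      have h1 : ((PySem.Set.ofList xs).map (fun k => (((xs ++ [t]).count k : Nat) : Int) * g k))
          = (PySem.Set.ofList xs).map (fun k => ((xs.count k : Nat) : Int) * g k) := by
        apply List.map_congr_left
        intro k hk
        have hkx : k ∈ xs := (PySem.Set.mem_ofList _ _).mp hk
        have hkt : k ≠ t := fun he => ht (he ▸ hkx)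
        have hc : (xs ++ [t]).count k = xs.count k := by
          simp [List.count_append, List.count_cons]
          exact fun he => hkt he.symm
        rw [hc]
      rw [h1, ih]
      simp [List.count_eq_zero.mpr ht]

-- B's fold over the distinct items is an accumulating sum of signed multiplicities
theorem pv_b_fold (P N : String → Bool) (items : List (String × Int)) (s : Int) :
    items.foldl (fun s p =>
        if N p.1 then (if P p.1 then s + p.2 else s) - p.2
        else if P p.1 then s + p.2 else s) s
      = s + (items.map (fun p => (if P p.1 then p.2 else 0) - (if N p.1 then p.2 else 0))).sum := by
  have hfun : (fun (s : Int) (p : String × Int) =>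
      if N p.1 then (if P p.1 then s + p.2 else s) - p.2
      else if P p.1 then s + p.2 else s)
      = fun s p => s + ((if P p.1 then p.2 else 0) - (if N p.1 then p.2 else 0)) := by
    funext s p
    split_ifs <;> ring
  rw [hfun, PySem.List.foldl_add]

-- the two scores coincide
theorem pv_scores_eq (tokens positive_words negative_words : List String) :
    (((tokens.foldl (fun d t => d.insert t (d.getD t 0 + 1)) PySem.Dict.empty : PySem.Dict String Int)).items.foldl
      (fun s p =>
        if negative_words.contains p.1 then (if positive_words.contains p.1 then s + p.2 else s) - p.2
        else if positive_words.contains p.1 then s + p.2 else s) 0)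
    = tokens.foldl (fun acc token => if positive_words.contains token then acc + 1 else acc) 0
      - tokens.foldl (fun acc token => if negative_words.contains token then acc + 1 else acc) 0 := by
  rw [PySem.Dict.foldl_insert_getD_add_one_eq_counter, pv_b_fold, PySem.Dict.items_counter, List.map_map]
  have hterm : ((fun p : String × Int => (if positive_words.contains p.1 then p.2 else 0)
        - (if negative_words.contains p.1 then p.2 else 0)) ∘ fun k => (k, ((tokens.count k : Nat) : Int)))
      = fun k => ((tokens.count k : Nat) : Int) *
          ((if positive_words.contains k then (1:Int) else 0) - (if negative_words.contains k then (1:Int) else 0)) := by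
    funext k
    dsimp [Function.comp]
    split_ifs <;> ring
  rw [hterm, pv_sum_count_ofList, pv_sum_map_sub,
      PySem.List.sum_map_ite_one_zero, PySem.List.sum_map_ite_one_zero,
      PySem.List.foldl_count_if, PySem.List.foldl_count_if]
  omega

-- ===== VERDICT (by name: the statement is the Claim_ definition above) =====
theorem label_sentiment_spec : Claim_equal_label_sentiment := by
  intro tokens positive_words negative_words _
  unfold Spec_label_sentiment
  simp only [label_sentiment, label_sentiment_alt]
  rw [pv_scores_eq]
  set E : Int := tokens.foldl (fun acc token => if positive_words.contains token then acc + 1 else acc) 0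
      - tokens.foldl (fun acc token => if negative_words.contains token then acc + 1 else acc) 0 with hE
  rcases lt_trichotomy E 0 with h | h | h
  · have h1 : ¬ E > 0 := by omega
    simp only [if_neg h1, if_pos h]
    congr 1
  · have h1 : ¬ E > 0 := by omega
    have h2 : ¬ E < 0 := by omega
    simp only [if_neg h1, if_neg h2]
    congr 1
  · have h2 : ¬ E < 0 := by omega
    simp only [if_pos h, if_neg h2]
    congr 1
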